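-- pv_equiv track=rewrite | github.com/vadimartemovv/ai_agent_ | app/main.py | _sanitize_summary
-- ===== SOURCE A (Python) =====
-- def _sanitize_summary(text: str) -> str:
--     # Remove common numbering like "1." or "8." at line starts.
--     lines = []
--     for line in text.splitlines():
--         stripped = line.lstrip()
--         if stripped[:2].isdigit() and stripped[1:2] == ".":
--             stripped = stripped[2:].lstrip()
--         elif len(stripped) >= 3 and stripped[0].isdigit() and stripped[1:2].isdigit() and stripped[2:3] == ".":
--             stripped = stripped[3:].lstrip()
--         lines.append(stripped)
--     return " ".join([l for l in lines if l]).strip()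
-- ===== SOURCE B (Python) =====
-- import re
--
-- _NUM = re.compile(r'^\d\d\.\s*')
--
-- def _sanitize_summary(text: str) -> str:
--     cleaned = (_NUM.sub('', line.lstrip()) for line in text.splitlines())
--     return ' '.join(filter(None, cleaned)).strip()
-- ===== Notes on version B (the rewrite author's own statement) =====
-- stated objective: idiomatic
-- what changed: Replaces A's explicit loop with list accumulator, its dead single-digit branch and its manual slice/index checks by a single precompiled regex substitution (^\d\d\.\s*) mapped over the lines and joined with filter(None, ...).
import Mathlib
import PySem

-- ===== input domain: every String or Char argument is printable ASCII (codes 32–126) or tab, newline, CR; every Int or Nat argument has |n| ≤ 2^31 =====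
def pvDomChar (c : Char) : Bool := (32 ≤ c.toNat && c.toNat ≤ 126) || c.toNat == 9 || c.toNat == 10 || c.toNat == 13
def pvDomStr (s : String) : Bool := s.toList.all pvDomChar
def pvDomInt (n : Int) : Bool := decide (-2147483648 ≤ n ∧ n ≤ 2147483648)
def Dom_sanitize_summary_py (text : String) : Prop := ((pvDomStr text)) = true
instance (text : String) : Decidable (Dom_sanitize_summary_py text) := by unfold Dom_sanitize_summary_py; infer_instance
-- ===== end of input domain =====

-- B replaces A's explicit loop, dead single-digit branch and manual index checks by one regex
-- substitution (^\d\d\.\s*) mapped over the lines — objective: idiomatic/simpler, same cost.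

-- ===== PORT A =====
-- literal transliteration of A: loop appending to `lines`, both branches kept (in order)
def sanitize_summary_py (text : String) : String :=
  let lines : List (List Char) :=
    (PySem.Chars.splitlines text.toList).foldl (fun acc line =>
      let stripped := PySem.Chars.lstrip line
      let stripped :=
        if PySem.Chars.strIsdigit (PySem.List.slice stripped none (some 2))
            && (PySem.List.slice stripped (some 1) (some 2) == ['.']) then
          PySem.Chars.lstrip (PySem.List.slice stripped (some 2) none)
        else if decide (3 ≤ stripped.length)
            && (match PySem.List.pyGet? stripped 0 with
                | some c => PySem.Chars.isdigit c
                | none => false)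
            && PySem.Chars.strIsdigit (PySem.List.slice stripped (some 1) (some 2))
            && (PySem.List.slice stripped (some 2) (some 3) == ['.']) then
          PySem.Chars.lstrip (PySem.List.slice stripped (some 3) none)
        else stripped
      acc ++ [stripped]) []
  String.ofList (PySem.Chars.strip (PySem.Chars.join [' '] (lines.filter (fun l => !l.isEmpty))))

-- ===== PORT B =====
-- hand port of the regex ^\d\d\.\s* (exact on the ASCII domain): test the anchored match …
def pvNum2Match (s : List Char) : Bool :=
  match s with
  | c0 :: c1 :: c2 :: _ => PySem.Chars.isdigit c0 && PySem.Chars.isdigit c1 && c2 == '.'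
  | _ => false

-- … and _NUM.sub('', s): drop the matched "\d\d." then the \s* run (= lstrip of the rest)
def pvNum2Sub (line : List Char) : List Char :=
  let s := PySem.Chars.lstrip line
  if pvNum2Match s then PySem.Chars.lstrip (s.drop 3) else s

def sanitize_summary_py_alt (text : String) : String :=
  String.ofList (PySem.Chars.strip (PySem.Chars.join [' ']
    (((PySem.Chars.splitlines text.toList).map pvNum2Sub).filter (fun l => !l.isEmpty))))

-- ===== PRECONDITION & SPEC =====
def Spec_sanitize_summary_py (text : String) (out : String) : Prop := out = sanitize_summary_py_alt text
instance (text : String) (out : String) : Decidable (Spec_sanitize_summary_py text out) := by unfold Spec_sanitize_summary_py; infer_instance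

-- ===== CLAIM (what is proved, stated in full; the proofs are below) =====
def Claim_equal_sanitize_summary_py : Prop := ∀ (text : String), Dom_sanitize_summary_py text → Spec_sanitize_summary_py text (sanitize_summary_py text)

-- ===== LEMMAS AND PROOFS =====

-- per-line agreement: A's two explicit branches compute exactly the regex substitution
theorem pv_line_aux (s : List Char) :
    (if PySem.Chars.strIsdigit (PySem.List.slice s none (some 2))
         && (PySem.List.slice s (some 1) (some 2) == ['.']) then
       PySem.Chars.lstrip (PySem.List.slice s (some 2) none)
     else if decide (3 ≤ s.length)
         && (match PySem.List.pyGet? s 0 with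
             | some c => PySem.Chars.isdigit c
             | none => false)
         && PySem.Chars.strIsdigit (PySem.List.slice s (some 1) (some 2))
         && (PySem.List.slice s (some 2) (some 3) == ['.']) then
       PySem.Chars.lstrip (PySem.List.slice s (some 3) none)
     else s) = (if pvNum2Match s then PySem.Chars.lstrip (s.drop 3) else s) := by
  match s with
  | [] => simp [pvNum2Match, PySem.Chars.strIsdigit, PySem.List.slice]
  | [c0] =>
    simp [pvNum2Match, PySem.Chars.strIsdigit, PySem.List.slice, PySem.List.clampIdx]
  | [c0, c1] =>
    by_cases h1 : c1 = '.'
    · subst h1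
      simp [pvNum2Match, PySem.Chars.strIsdigit, PySem.List.slice, PySem.List.clampIdx,
        PySem.Chars.isdigit]
    · simp [pvNum2Match, PySem.Chars.strIsdigit, PySem.List.slice, PySem.List.clampIdx, h1]
  | c0 :: c1 :: c2 :: rest =>
    by_cases h1 : c1 = '.'
    · subst h1
      have hge : (0:Int) ≤ (rest.length:Int) + 1 + 1 := by positivity
      simp [pvNum2Match, PySem.Chars.strIsdigit, PySem.List.slice, PySem.List.clampIdx,
        PySem.Chars.isdigit, PySem.List.pyGet?, PySem.List.pyIdx?, hge]
    · by_cases h2 : c2 = '.'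
      · subst h2
        have hge : (0:Int) ≤ (rest.length:Int) + 1 + 1 := by positivity
        simp [pvNum2Match, PySem.Chars.strIsdigit, PySem.List.slice, PySem.List.clampIdx,
          PySem.List.pyGet?, PySem.List.pyIdx?, h1]
        rw [if_pos hge]
        simp
      · have hge : (0:Int) ≤ (rest.length:Int) + 1 + 1 := by positivity
        simp [pvNum2Match, PySem.Chars.strIsdigit, PySem.List.slice, PySem.List.clampIdx,
          PySem.List.pyGet?, PySem.List.pyIdx?, h1, h2, hge]

-- ===== VERDICT (by name: the statement is the Claim_ definition above) =====
theorem sanitize_summary_py_spec : Claim_equal_sanitize_summary_py := by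
  intro text _
  unfold Spec_sanitize_summary_py sanitize_summary_py sanitize_summary_py_alt
  rw [PySem.List.foldl_append_singleton_eq_map]
  simp only [List.nil_append]
  congr 3
  refine congrArg _ (List.map_congr_left (fun line _ => ?_))
  simpa [pvNum2Sub] using pv_line_aux (PySem.Chars.lstrip line)
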